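-- pv_equiv track=rewrite | github.com/bucketpotato01/advent | 2021/10.py | solve
-- ===== SOURCE A (Python) =====
-- def solve(s):
--
-- 	def get(cs):
-- 		cv = []
-- 		opening = "([{<"
--
-- 		for i in cs:
-- 			if i in opening:
-- 				cv.append(i)
-- 				continue
-- 			if i == ')':
-- 				if len(cv) == 0 or cv[-1] != '(':
-- 					return 3
-- 				cv = cv[:-1]
-- 			if i == ']':
-- 				if len(cv) == 0 or cv[-1] != '[':
-- 					return 57
-- 				cv = cv[:-1]
-- 			if i == '}':
-- 				if len(cv) == 0 or cv[-1] != '{':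
-- 					return 1197
-- 				cv = cv[:-1]
-- 			if i == '>':
-- 				if len(cv) == 0 or cv[-1] != '<':
-- 					return 25137
-- 				cv = cv[:-1]
--
--
-- 		return 0
--
-- 	def get2(cs):
-- 		cv = []
-- 		opening = "([{<"
--
-- 		for i in cs:
-- 			if i in opening:
-- 				cv.append(i)
-- 				continue
-- 			if i == ')':
-- 				if len(cv) == 0 or cv[-1] != '(':
-- 					return 3
-- 				cv = cv[:-1]
-- 			if i == ']':
-- 				if len(cv) == 0 or cv[-1] != '[':
-- 					return 57
-- 				cv = cv[:-1]
-- 			if i == '}':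
-- 				if len(cv) == 0 or cv[-1] != '{':
-- 					return 1197
-- 				cv = cv[:-1]
-- 			if i == '>':
-- 				if len(cv) == 0 or cv[-1] != '<':
-- 					return 25137
-- 				cv = cv[:-1]
--
-- 		cv = cv[::-1]
--
-- 		score = 0
-- 		for i in cv:
-- 			score *= 5
-- 			if i == '(':
-- 				score += 1
-- 			if i == '[':
-- 				score += 2
-- 			if i == '{':
-- 				score += 3
-- 			if i == '<':
-- 				score += 4
--
-- 		return score
--
-- 	s = s.split("\n")
-- 	ans1 = 0
-- 	ok = []
-- 	for i in s:
-- 		ans1 += get(i)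
-- 		if get(i) == 0:
-- 			ok.append(i)
--
-- 	ans = []
-- 	for i in ok:
-- 		ans.append(get2(i))
-- 	ans.sort()
--
-- 	return ans[len(ans) // 2]
-- ===== SOURCE B (Python) =====
-- OPEN = "([{<"
-- CLOSE = ")]}>"
-- PAIR = {"(": ")", "[": "]", "{": "}", "<": ">"}
-- COMP = {"(": 1, "[": 2, "{": 3, "<": 4}
--
-- def reduce_line(line):
--     """Rewrite the bracket word to its normal form by repeatedly deleting
--     adjacent matched pairs (no stack): the residue is all that matters."""
--     cs = [c for c in line if c in OPEN or c in CLOSE]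
--     while True:
--         removed = False
--         i = 0
--         while i + 1 < len(cs):
--             if cs[i] in PAIR and PAIR[cs[i]] == cs[i + 1]:
--                 del cs[i:i + 2]
--                 removed = True
--                 break
--             i += 1
--         if not removed:
--             return cs
--
-- def solve(s):
--     scores = []
--     for line in s.split("\n"):
--         r = reduce_line(line)
--         if all(c in OPEN for c in r):
--             t = 0
--             for c in reversed(r):
--                 t = t * 5 + COMP[c]
--             scores.append(t)
--     scores.sort()
--     return scores[len(scores) // 2]
-- ===== Notes on version B (the rewrite author's own statement) =====
-- stated objective: alternative
-- what changed: A judges each line with a per-character stack automaton (run three times per line, plus corruption scores); B instead rewrites each line's bracket word to its normal form by repeatedly deleting adjacent matched pairs, keeps a line iff the residue contains only openers, and never computes corruption scores at all.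
import Mathlib
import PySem

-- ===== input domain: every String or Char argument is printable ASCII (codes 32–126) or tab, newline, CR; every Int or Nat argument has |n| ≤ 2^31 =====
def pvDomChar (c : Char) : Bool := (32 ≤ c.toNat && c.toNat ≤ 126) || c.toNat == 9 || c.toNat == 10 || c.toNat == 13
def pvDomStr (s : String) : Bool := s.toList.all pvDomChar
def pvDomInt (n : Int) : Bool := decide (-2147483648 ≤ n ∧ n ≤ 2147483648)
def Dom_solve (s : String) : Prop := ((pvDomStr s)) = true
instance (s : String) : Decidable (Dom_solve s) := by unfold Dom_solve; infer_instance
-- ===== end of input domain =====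

-- B replaces A's per-character stack automaton (run three times per line) by rewriting
-- each line's bracket word to its normal form by repeatedly deleting adjacent matched
-- pairs; a line is kept iff the residue is all openers (no corruption scores at all).
-- Objective: alternative algorithm (pair-elimination rewriting vs stack automaton).

-- ===== PORT A =====
-- inner helper get(cs): corruption score of a line (0 if none); cv grows at the end, as in Python
def solveGet : List Char → List Char → Int
  | [], _ => 0
  | i :: cs, cv =>
    if ['(', '[', '{', '<'].contains i then solveGet cs (cv ++ [i])   -- i in opening
    else if i = ')' then
      (if cv.length = 0 ∨ PySem.List.pyGet? cv (-1) ≠ some '(' then 3 else solveGet cs cv.dropLast)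
    else if i = ']' then
      (if cv.length = 0 ∨ PySem.List.pyGet? cv (-1) ≠ some '[' then 57 else solveGet cs cv.dropLast)
    else if i = '}' then
      (if cv.length = 0 ∨ PySem.List.pyGet? cv (-1) ≠ some '{' then 1197 else solveGet cs cv.dropLast)
    else if i = '>' then
      (if cv.length = 0 ∨ PySem.List.pyGet? cv (-1) ≠ some '<' then 25137 else solveGet cs cv.dropLast)
    else solveGet cs cv

-- the scoring loop at the end of get2: score = score*5 + value of opener
def solveGet2Step (score : Int) (i : Char) : Int :=
  score * 5 + (if i = '(' then 1 else if i = '[' then 2 else if i = '{' then 3 else if i = '<' then 4 else 0)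

-- inner helper get2(cs): same scan as get, then completion score of reversed cv
def solveGet2 : List Char → List Char → Int
  | [], cv => (cv.reverse).foldl solveGet2Step 0     -- cv = cv[::-1]; score loop
  | i :: cs, cv =>
    if ['(', '[', '{', '<'].contains i then solveGet2 cs (cv ++ [i])
    else if i = ')' then
      (if cv.length = 0 ∨ PySem.List.pyGet? cv (-1) ≠ some '(' then 3 else solveGet2 cs cv.dropLast)
    else if i = ']' then
      (if cv.length = 0 ∨ PySem.List.pyGet? cv (-1) ≠ some '[' then 57 else solveGet2 cs cv.dropLast)
    else if i = '}' then
      (if cv.length = 0 ∨ PySem.List.pyGet? cv (-1) ≠ some '{' then 1197 else solveGet2 cs cv.dropLast)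
    else if i = '>' then
      (if cv.length = 0 ∨ PySem.List.pyGet? cv (-1) ≠ some '<' then 25137 else solveGet2 cs cv.dropLast)
    else solveGet2 cs cv

def solve (s : String) : Int :=
  let lines := (PySem.Str.split? s "\n").getD []             -- s = s.split("\n")
  -- for i in s: ans1 += get(i); if get(i) == 0: ok.append(i)
  let st := lines.foldl
      (fun (st : Int × List String) i =>
        (st.1 + solveGet i.toList [], if solveGet i.toList [] = 0 then st.2 ++ [i] else st.2))
      (0, [])
  let ok := st.2
  let ans := ok.foldl (fun ans i => ans ++ [solveGet2 i.toList []]) []   -- for i in ok: ans.append(get2(i))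
  let ans := PySem.List.sorted ans (fun x => x) false                    -- ans.sort()
  (PySem.List.pyGet? ans (PySem.Int.floordiv (ans.length : Int) 2)).getD 0   -- ans[len(ans)//2]

-- ===== PORT B =====
def isOpenerB (c : Char) : Bool := c = '(' || c = '[' || c = '{' || c = '<'   -- c in OPEN / c in PAIR
def isCloserB (c : Char) : Bool := c = ')' || c = ']' || c = '}' || c = '>'   -- c in CLOSE
def matchB (a b : Char) : Bool :=                                            -- a in PAIR and PAIR[a] == b
  (a = '(' && b = ')') || (a = '[' && b = ']') || (a = '{' && b = '}') || (a = '<' && b = '>')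
def compValB (c : Char) : Int :=                                             -- COMP[c]
  if c = '(' then 1 else if c = '[' then 2 else if c = '{' then 3 else 4

-- the inner scan of reduce_line: first adjacent matched pair removed, none if irreducible
def rfp : List Char → Option (List Char)
  | a :: b :: t => if matchB a b then some t else (rfp (b :: t)).map (a :: ·)
  | _ => none

-- the while-True loop of reduce_line; the fuel (= initial length) only makes the loop
-- total: each removal shortens the list by 2, so the fuel is never exhausted
def reduceFuel : Nat → List Char → List Char
  | 0, l => l
  | f + 1, l => match rfp l with | none => l | some l' => reduceFuel f l'

def reduceLine (l : List Char) : List Char :=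
  let cs := l.filter (fun c => isOpenerB c || isCloserB c)
  reduceFuel cs.length cs

def solve_alt (s : String) : Int :=
  let scores := ((PySem.Str.split? s "\n").getD []).foldl
      (fun scores line =>
        let r := reduceLine line.toList
        if r.all isOpenerB then
          scores ++ [r.reverse.foldl (fun t c => t * 5 + compValB c) 0]
        else scores)
      []
  let scores := PySem.List.sorted scores (fun x => x) false
  (PySem.List.pyGet? scores (PySem.Int.floordiv (scores.length : Int) 2)).getD 0

-- ===== PRECONDITION & SPEC =====
def pairOf (c : Char) : Char :=                   -- opener matching the closer c
  if c = ')' then '(' else if c = ']' then '[' else if c = '}' then '{' else '<'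

-- Dyck-prefix check: the line is uncorrupted (every closer matches the pending opener)
def pvLineOk : List Char → List Char → Bool
  | [], _ => true
  | c :: cs, stack =>
    if ['(', '[', '{', '<'].contains c then pvLineOk cs (c :: stack)
    else if [')', ']', '}', '>'].contains c then
      match stack with
      | [] => false
      | t :: rest => if t ≠ pairOf c then false else pvLineOk cs rest
    else pvLineOk cs stack

-- Pre_ excludes exactly the inputs where every line is corrupted: there A's (and B's)
-- score list is empty and Python raises IndexError on ans[len(ans)//2].
def Pre_solve (s : String) : Prop :=
  ∃ l ∈ (PySem.Str.split? s "\n").getD [], pvLineOk l.toList [] = true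
instance (s : String) : Decidable (Pre_solve s) := by unfold Pre_solve; infer_instance

def pvWitness_solve : String := "([])"

def Spec_solve (s : String) (out : Int) : Prop := out = solve_alt s
instance (s : String) (out : Int) : Decidable (Spec_solve s out) := by unfold Spec_solve; infer_instance

-- ===== CLAIM (what is proved, stated in full; the proofs are below) =====
def Claim_equal_solve : Prop := ∀ (s : String), Dom_solve s → Pre_solve s → Spec_solve s (solve s)

-- ===== LEMMAS AND PROOFS =====

def closerScoreB (c : Char) : Int :=
  if c = ')' then 3 else if c = ']' then 57 else if c = '}' then 1197 else 25137

-- reference stack automaton (proof device): A's scan in one pass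
def parseLine : List Char → List Char → Int × List Char
  | [], stack => (0, stack)
  | c :: cs, stack =>
    if ['(', '[', '{', '<'].contains c then parseLine cs (c :: stack)
    else if [')', ']', '}', '>'].contains c then
      match stack with
      | [] => (closerScoreB c, [])
      | t :: rest => if t ≠ pairOf c then (closerScoreB c, t :: rest) else parseLine cs rest
    else parseLine cs stack

-- canonical normal form of the bracket word, computed by a stack pass (proof device:
-- both A's automaton and B's rewriting are related to it)
def canonStep (st : List Char) (c : Char) : List Char :=
  if isOpenerB c then c :: st
  else if isCloserB c then
    match st with
    | [] => [c]
    | t :: rest => if t = pairOf c then rest else c :: st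
  else st

-- score of the first (deepest) closer of a residue, 0 if none
def fcb : List Char → Int
  | [] => 0
  | c :: t => if isCloserB c then closerScoreB c else fcb t

def isBracketB (c : Char) : Bool := isOpenerB c || isCloserB c

theorem opener_cases {c : Char} (h : isOpenerB c = true) :
    c = '(' ∨ c = '[' ∨ c = '{' ∨ c = '<' := by
  simp [isOpenerB] at h; tauto

theorem closer_cases {c : Char} (h : isCloserB c = true) :
    c = ')' ∨ c = ']' ∨ c = '}' ∨ c = '>' := by
  simp [isCloserB] at h; tauto

theorem opener_not_closer {c : Char} (h : isOpenerB c = true) : isCloserB c = false := by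
  rcases opener_cases h with rfl | rfl | rfl | rfl <;> decide

theorem closer_not_opener {c : Char} (h : isCloserB c = true) : isOpenerB c = false := by
  rcases closer_cases h with rfl | rfl | rfl | rfl <;> decide

theorem closerScore_ne {c : Char} : closerScoreB c ≠ 0 := by
  unfold closerScoreB; split_ifs <;> decide

theorem contains_open (c : Char) : (['(', '[', '{', '<'].contains c) = isOpenerB c := by
  by_cases h1 : c = '('
  · simp [h1, isOpenerB]
  · by_cases h2 : c = '['
    · simp [h2, isOpenerB]
    · by_cases h3 : c = '{'
      · simp [h3, isOpenerB]
      · by_cases h4 : c = '<'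
        · simp [h4, isOpenerB]
        · simp [h1, h2, h3, h4, isOpenerB]

theorem contains_close (c : Char) : ([')', ']', '}', '>'].contains c) = isCloserB c := by
  by_cases h1 : c = ')'
  · simp [h1, isCloserB]
  · by_cases h2 : c = ']'
    · simp [h2, isCloserB]
    · by_cases h3 : c = '}'
      · simp [h3, isCloserB]
      · by_cases h4 : c = '>'
        · simp [h4, isCloserB]
        · simp [h1, h2, h3, h4, isCloserB]

theorem pairOf_opener (c : Char) : isOpenerB (pairOf c) = true := by
  unfold pairOf; split_ifs <;> decide

theorem fcb_openers {l : List Char} (h : ∀ c ∈ l, isOpenerB c = true) : fcb l = 0 := by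
  induction l with
  | nil => rfl
  | cons c t ih =>
    have := opener_not_closer (h c (by simp))
    simp only [fcb, this, Bool.false_eq_true, if_false]
    exact ih fun x hx => h x (by simp [hx])

theorem fcb_mid (p : List Char) (c : Char) (q : List Char)
    (hp : ∀ x ∈ p, isOpenerB x = true) (hc : isCloserB c = true) :
    fcb (p ++ c :: q) = closerScoreB c := by
  induction p with
  | nil => simp [fcb, hc]
  | cons x p ih =>
    have := opener_not_closer (hp x (by simp))
    simp only [List.cons_append, fcb, this, Bool.false_eq_true, if_false]
    exact ih fun y hy => hp y (by simp [hy])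

-- a closer on the stack is never removed: everything below it is stable
theorem canon_stable (cs : List Char) : ∀ (s st : List Char) (c : Char), isCloserB c = true →
    ∃ u, List.foldl canonStep (s ++ c :: st) cs = u ++ c :: st := by
  induction cs with
  | nil => exact fun s st c _ => ⟨s, rfl⟩
  | cons x cs ih =>
    intro s st c hc
    simp only [List.foldl_cons]
    by_cases hx : isOpenerB x = true
    · have : canonStep (s ++ c :: st) x = (x :: s) ++ c :: st := by simp [canonStep, hx]
      rw [this]; exact ih (x :: s) st c hc
    · by_cases hx2 : isCloserB x = true
      · cases s with
        | nil =>
          have hne : ¬ c = pairOf x := by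
            intro h
            have h2 : isOpenerB (pairOf x) = true := pairOf_opener x
            rw [← h, closer_not_opener hc] at h2
            exact Bool.false_ne_true h2
          have : canonStep ([] ++ c :: st) x = [x] ++ c :: st := by
            simp [canonStep, hx, hx2, Ne.symm, hne]
          rw [this]; exact ih [x] st c hc
        | cons a s' =>
          by_cases ha : a = pairOf x
          · have : canonStep ((a :: s') ++ c :: st) x = s' ++ c :: st := by
              simp [canonStep, hx, hx2, ha]
            rw [this]; exact ih s' st c hc
          · have : canonStep ((a :: s') ++ c :: st) x = (x :: a :: s') ++ c :: st := by
              simp [canonStep, hx, hx2, ha]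
            rw [this]; exact ih (x :: a :: s') st c hc
      · have : canonStep (s ++ c :: st) x = s ++ c :: st := by simp [canonStep, hx, hx2]
        rw [this]; exact ih s st c hc

theorem canon_fcb_mismatch (cs : List Char) (st : List Char) (d : Char)
    (hst : ∀ c ∈ st, isOpenerB c = true) (hd : isCloserB d = true) :
    fcb (List.foldl canonStep (d :: st) cs).reverse = closerScoreB d := by
  obtain ⟨u, hu⟩ := canon_stable cs [] st d hd
  have hu' : List.foldl canonStep (d :: st) cs = u ++ d :: st := hu
  rw [hu']
  have : (u ++ d :: st).reverse = st.reverse ++ d :: u.reverse := by simp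
  rw [this]
  exact fcb_mid _ d _ (fun x hx => hst x (by simpa using hx)) hd

-- ===== A's automaton agrees with the reference automaton (parseLine) =====
theorem fold_score_eq (st : List Char) (hst : ∀ c ∈ st, isOpenerB c = true) :
    ∀ a : Int, st.foldl solveGet2Step a = st.foldl (fun t c => t * 5 + compValB c) a := by
  induction st with
  | nil => intro a; rfl
  | cons t rest ih =>
    intro a
    have ht := opener_cases (hst t (by simp))
    have hrest : ∀ c ∈ rest, isOpenerB c = true := fun c hc => hst c (by simp [hc])
    simp only [List.foldl_cons, ih hrest]
    congr 1
    rcases ht with h | h | h | h <;> simp [h, solveGet2Step, compValB]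

theorem get_eq_parse (cs : List Char) : ∀ st : List Char, (∀ c ∈ st, isOpenerB c = true) →
    solveGet cs st.reverse = (parseLine cs st).1 ∧
    solveGet2 cs st.reverse =
      (if (parseLine cs st).1 = 0 then (parseLine cs st).2.foldl (fun t c => t * 5 + compValB c) 0
       else (parseLine cs st).1) := by
  induction cs with
  | nil =>
    intro st hst
    refine ⟨rfl, ?_⟩
    simp only [solveGet2, parseLine, List.reverse_reverse]
    exact fold_score_eq st hst 0
  | cons c cs ih =>
    intro st hst
    have push : ∀ o : Char, isOpenerB o = true →
        solveGet cs (st.reverse ++ [o]) = (parseLine cs (o :: st)).1 ∧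
        solveGet2 cs (st.reverse ++ [o]) =
          (if (parseLine cs (o :: st)).1 = 0
           then (parseLine cs (o :: st)).2.foldl (fun t c => t * 5 + compValB c) 0
           else (parseLine cs (o :: st)).1) := by
      intro o ho
      have := ih (o :: st) (by
        intro x hx
        rcases List.mem_cons.mp hx with rfl | hx
        · exact ho
        · exact hst x hx)
      simpa [← List.reverse_cons] using this
    by_cases h1 : c = '('
    · subst h1; simpa [solveGet, solveGet2, parseLine] using push '(' (by decide)
    · by_cases h2 : c = '['
      · subst h2; simpa [solveGet, solveGet2, parseLine, h1] using push '[' (by decide)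
      · by_cases h3 : c = '{'
        · subst h3; simpa [solveGet, solveGet2, parseLine, h1, h2] using push '{' (by decide)
        · by_cases h4 : c = '<'
          · subst h4; simpa [solveGet, solveGet2, parseLine, h1, h2, h3] using push '<' (by decide)
          · by_cases h5 : c = ')'
            · subst h5
              cases st with
              | nil => simp [solveGet, solveGet2, parseLine, closerScoreB]
              | cons t rest =>
                by_cases ht : t = '('
                · subst ht
                  simpa [solveGet, solveGet2, parseLine, pairOf,
                    PySem.List.pyGet?_neg_one] using ih rest (fun x hx => hst x (List.mem_cons_of_mem _ hx))
                · simp [solveGet, solveGet2, parseLine, pairOf, closerScoreB,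
                    PySem.List.pyGet?_neg_one, ht]
            · by_cases h6 : c = ']'
              · subst h6
                cases st with
                | nil => simp [solveGet, solveGet2, parseLine, closerScoreB, h5]
                | cons t rest =>
                  by_cases ht : t = '['
                  · subst ht
                    simpa [solveGet, solveGet2, parseLine, pairOf, h5,
                      PySem.List.pyGet?_neg_one] using ih rest (fun x hx => hst x (List.mem_cons_of_mem _ hx))
                  · simp [solveGet, solveGet2, parseLine, pairOf, closerScoreB, h5,
                      PySem.List.pyGet?_neg_one, ht]
              · by_cases h7 : c = '}'
                · subst h7
                  cases st with
                  | nil => simp [solveGet, solveGet2, parseLine, closerScoreB, h5, h6]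
                  | cons t rest =>
                    by_cases ht : t = '{'
                    · subst ht
                      simpa [solveGet, solveGet2, parseLine, pairOf, h5, h6,
                        PySem.List.pyGet?_neg_one] using ih rest (fun x hx => hst x (List.mem_cons_of_mem _ hx))
                    · simp [solveGet, solveGet2, parseLine, pairOf, closerScoreB, h5, h6,
                        PySem.List.pyGet?_neg_one, ht]
                · by_cases h8 : c = '>'
                  · subst h8
                    cases st with
                    | nil => simp [solveGet, solveGet2, parseLine, closerScoreB, h5, h6, h7]
                    | cons t rest =>
                      by_cases ht : t = '<'
                      · subst ht
                        simpa [solveGet, solveGet2, parseLine, pairOf, h5, h6, h7,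
                          PySem.List.pyGet?_neg_one] using ih rest (fun x hx => hst x (List.mem_cons_of_mem _ hx))
                      · simp [solveGet, solveGet2, parseLine, pairOf, closerScoreB, h5, h6, h7,
                          PySem.List.pyGet?_neg_one, ht]
                  · simpa [solveGet, solveGet2, parseLine, h1, h2, h3, h4, h5, h6, h7, h8]
                      using ih st hst

theorem get_nil_eq (l : List Char) : solveGet l [] = (parseLine l []).1 :=
  (get_eq_parse l [] (by simp)).1

theorem get2_nil_eq (l : List Char) (h : (parseLine l []).1 = 0) :
    solveGet2 l [] = (parseLine l []).2.foldl (fun t c => t * 5 + compValB c) 0 := by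
  have := (get_eq_parse l [] (by simp)).2
  simpa [h] using this

-- ===== the reference automaton agrees with the canonical form =====
theorem parse_canon (cs : List Char) : ∀ st : List Char, (∀ c ∈ st, isOpenerB c = true) →
    fcb (List.foldl canonStep st cs).reverse = (parseLine cs st).1 ∧
    ((parseLine cs st).1 = 0 → List.foldl canonStep st cs = (parseLine cs st).2) := by
  induction cs with
  | nil =>
    intro st hst
    refine ⟨?_, fun _ => rfl⟩
    simp only [List.foldl_nil, parseLine]
    exact fcb_openers fun c hc => hst c (by simpa using hc)
  | cons c cs ih =>
    intro st hst
    by_cases hop : isOpenerB c = true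
    · have hcont : (['(', '[', '{', '<'].contains c) = true := by rw [contains_open]; exact hop
      have hstep : canonStep st c = c :: st := by simp [canonStep, hop]
      simp only [List.foldl_cons, hstep, parseLine, hcont, if_true]
      exact ih (c :: st) (by
        intro x hx
        rcases List.mem_cons.mp hx with rfl | hx
        · exact hop
        · exact hst x hx)
    · by_cases hcl : isCloserB c = true
      · have hcont : (['(', '[', '{', '<'].contains c) = false := by
          rw [contains_open]; simpa using hop
        have hcont2 : ([')', ']', '}', '>'].contains c) = true := by
          rw [contains_close]; exact hcl
        cases st with
        | nil =>
          have hstep : canonStep [] c = [c] := by simp [canonStep, hop, hcl]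
          have hm := canon_fcb_mismatch cs [] c (by simp) hcl
          simp only [List.foldl_cons, hstep, parseLine, hcont, hcont2, Bool.false_eq_true,
            if_false, if_true]
          exact ⟨hm, fun h0 => absurd h0 closerScore_ne⟩
        | cons t rest =>
          by_cases ht : t = pairOf c
          · have hstep : canonStep (t :: rest) c = rest := by simp [canonStep, hop, hcl, ht]
            rw [List.foldl_cons, hstep]
            simp only [parseLine, hcont, hcont2, Bool.false_eq_true, if_false, if_true, ht,
              ne_eq, not_true_eq_false]
            exact ih rest (fun x hx => hst x (List.mem_cons_of_mem _ hx))
          · have hstep : canonStep (t :: rest) c = c :: t :: rest := by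
              simp [canonStep, hop, hcl, ht]
            have hm := canon_fcb_mismatch cs (t :: rest) c hst hcl
            simp only [List.foldl_cons, hstep, parseLine, hcont, hcont2, Bool.false_eq_true,
              if_false, if_true, ne_eq, ht, not_false_eq_true]
            exact ⟨hm, fun h0 => absurd h0 closerScore_ne⟩
      · have hcont : (['(', '[', '{', '<'].contains c) = false := by
          rw [contains_open]; simpa using hop
        have hcont2 : ([')', ']', '}', '>'].contains c) = false := by
          rw [contains_close]; simpa using hcl
        have hstep : canonStep st c = st := by simp [canonStep, hop, hcl]
        simp only [List.foldl_cons, hstep, parseLine, hcont, hcont2, Bool.false_eq_true, if_false]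
        exact ih st hst

-- ===== B's rewriting reaches the canonical form =====
def noAdj : List Char → Bool
  | a :: b :: t => !matchB a b && noAdj (b :: t)
  | _ => true

theorem rfp_none_noAdj : ∀ l, rfp l = none → noAdj l = true := by
  intro l
  induction l with
  | nil => intro _; rfl
  | cons a t ih =>
    intro h
    cases t with
    | nil => rfl
    | cons b t' =>
      by_cases hm : matchB a b = true
      · simp [rfp, hm] at h
      · simp only [rfp, hm, Bool.false_eq_true, if_false, Option.map_eq_none_iff] at h
        simp only [noAdj, hm, Bool.not_false, Bool.true_and]
        exact ih h

theorem noAdj_cons {x : Char} {l : List Char} (h : noAdj (x :: l) = true) : noAdj l = true := by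
  cases l with
  | nil => rfl
  | cons b t => simp only [noAdj, Bool.and_eq_true] at h ⊢; exact h.2

theorem noAdj_mid : ∀ (u : List Char) (a b : Char) (v : List Char),
    noAdj (u ++ a :: b :: v) = true → matchB a b = false := by
  intro u
  induction u with
  | nil =>
    intro a b v h
    simp only [List.nil_append, noAdj, Bool.and_eq_true, Bool.not_eq_true'] at h
    exact h.1
  | cons x u ih => intro a b v h; exact ih a b v (noAdj_cons h)

theorem match_pairOf {c : Char} (hc : isCloserB c = true) : matchB (pairOf c) c = true := by
  rcases closer_cases hc with rfl | rfl | rfl | rfl <;> decide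

theorem noadj_canon : ∀ (cs st : List Char), (∀ c ∈ cs, isBracketB c = true) →
    noAdj (st.reverse ++ cs) = true → List.foldl canonStep st cs = cs.reverse ++ st := by
  intro cs
  induction cs with
  | nil => intro st _ _; simp
  | cons c cs ih =>
    intro st hb hna
    have hbc := hb c (by simp)
    simp only [List.foldl_cons]
    by_cases hx : isOpenerB c = true
    · have hstep : canonStep st c = c :: st := by simp [canonStep, hx]
      rw [hstep]
      have := ih (c :: st) (fun d hd => hb d (by simp [hd])) (by simpa using hna)
      simpa using this
    · have hc : isCloserB c = true := by
        simp only [isBracketB, Bool.or_eq_true, hx, Bool.false_eq_true, false_or] at hbc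
        exact hbc
      cases st with
      | nil =>
        have hstep : canonStep [] c = [c] := by simp [canonStep, hx, hc]
        rw [hstep]
        have := ih [c] (fun d hd => hb d (by simp [hd])) (by simpa using hna)
        simpa using this
      | cons t rest =>
        by_cases ht : t = pairOf c
        · exfalso
          have hmid := noAdj_mid rest.reverse t c cs (by simpa using hna)
          have : matchB t c = true := ht ▸ match_pairOf hc
          rw [hmid] at this; exact Bool.false_ne_true this
        · have hstep : canonStep (t :: rest) c = c :: t :: rest := by
            simp [canonStep, hx, hc, ht]
          rw [hstep]
          have := ih (c :: t :: rest) (fun d hd => hb d (by simp [hd])) (by simpa using hna)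
          simpa using this

theorem rfp_canon : ∀ (l l' : List Char), rfp l = some l' →
    ∀ st, List.foldl canonStep st l = List.foldl canonStep st l' := by
  intro l
  induction l with
  | nil => intro l' h; simp [rfp] at h
  | cons a t ih =>
    intro l' h st
    cases t with
    | nil => simp [rfp] at h
    | cons b t' =>
      by_cases hm : matchB a b = true
      · simp only [rfp, hm, if_true, Option.some.injEq] at h
        subst h
        rcases (by simpa [matchB] using hm :
            (((a = '(' ∧ b = ')') ∨ (a = '[' ∧ b = ']')) ∨ (a = '{' ∧ b = '}')) ∨ (a = '<' ∧ b = '>'))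
          with ((⟨rfl, rfl⟩ | ⟨rfl, rfl⟩) | ⟨rfl, rfl⟩) | ⟨rfl, rfl⟩ <;>
          simp [List.foldl_cons, canonStep, isOpenerB, isCloserB, pairOf]
      · simp only [rfp, hm, Bool.false_eq_true, if_false, Option.map_eq_some_iff] at h
        obtain ⟨w, hw, rfl⟩ := h
        simp only [List.foldl_cons]
        exact ih w hw (canonStep st a)

theorem rfp_length : ∀ (l l' : List Char), rfp l = some l' → l'.length + 2 = l.length := by
  intro l
  induction l with
  | nil => intro l' h; simp [rfp] at h
  | cons a t ih =>
    intro l' h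
    cases t with
    | nil => simp [rfp] at h
    | cons b t' =>
      by_cases hm : matchB a b = true
      · simp [rfp, hm] at h; subst h; simp
      · simp only [rfp, hm, Bool.false_eq_true, if_false, Option.map_eq_some_iff] at h
        obtain ⟨w, hw, rfl⟩ := h
        have := ih w hw
        simp only [List.length_cons] at this ⊢
        omega

theorem rfp_all : ∀ (l l' : List Char) (P : Char → Bool), rfp l = some l' →
    l.all P = true → l'.all P = true := by
  intro l
  induction l with
  | nil => intro l' P h; simp [rfp] at h
  | cons a t ih =>
    intro l' P h hall
    cases t with
    | nil => simp [rfp] at h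
    | cons b t' =>
      simp only [List.all_cons, Bool.and_eq_true] at hall
      by_cases hm : matchB a b = true
      · simp [rfp, hm] at h; subst h; exact hall.2.2
      · simp only [rfp, hm, Bool.false_eq_true, if_false, Option.map_eq_some_iff] at h
        obtain ⟨w, hw, rfl⟩ := h
        have := ih w P hw (by simp only [List.all_cons, Bool.and_eq_true]; exact hall.2)
        simp only [List.all_cons, Bool.and_eq_true]
        exact ⟨hall.1, this⟩

theorem reduceFuel_spec : ∀ (fuel : Nat) (l : List Char), l.length ≤ fuel →
    rfp (reduceFuel fuel l) = none ∧
    (∀ st, List.foldl canonStep st (reduceFuel fuel l) = List.foldl canonStep st l) ∧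
    (∀ P : Char → Bool, l.all P = true → (reduceFuel fuel l).all P = true) := by
  intro fuel
  induction fuel with
  | zero =>
    intro l hl
    have : l = [] := List.length_eq_zero_iff.mp (Nat.le_zero.mp hl)
    subst this
    exact ⟨rfl, fun _ => rfl, fun _ h => h⟩
  | succ f ih =>
    intro l hl
    cases hr : rfp l with
    | none => simp [reduceFuel, hr]
    | some l' =>
      have hlen := rfp_length l l' hr
      have hle : l'.length ≤ f := by omega
      obtain ⟨h1, h2, h3⟩ := ih l' hle
      refine ⟨by simpa [reduceFuel, hr] using h1, ?_, ?_⟩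
      · intro st
        simp only [reduceFuel, hr]
        rw [h2 st, rfp_canon l l' hr st]
      · intro P hP
        simp only [reduceFuel, hr]
        exact h3 P (rfp_all l l' P hr hP)

theorem canon_all_bracket : ∀ (l st : List Char), (∀ c ∈ st, isBracketB c = true) →
    ∀ c ∈ List.foldl canonStep st l, isBracketB c = true := by
  intro l
  induction l with
  | nil => intro st h; simpa using h
  | cons x cs ih =>
    intro st h
    simp only [List.foldl_cons]
    apply ih
    intro c hc
    by_cases hx : isOpenerB x = true
    · simp only [canonStep, hx, if_true] at hc
      rcases List.mem_cons.mp hc with rfl | hc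
      · simp [isBracketB, hx]
      · exact h c hc
    · by_cases hx2 : isCloserB x = true
      · cases st with
        | nil =>
          simp only [canonStep, hx, hx2, Bool.false_eq_true, if_false, if_true,
            List.mem_singleton] at hc
          subst hc; simp [isBracketB, hx2]
        | cons t rest =>
          by_cases ht : t = pairOf x
          · simp only [canonStep, hx, hx2, ht, Bool.false_eq_true, if_false, if_true] at hc
            exact h c (List.mem_cons_of_mem _ hc)
          · simp only [canonStep, hx, hx2, Bool.false_eq_true, if_false, if_true,
              if_neg ht] at hc
            rcases List.mem_cons.mp hc with rfl | hc
            · simp [isBracketB, hx2]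
            · exact h c hc
      · simp only [canonStep, hx, hx2, Bool.false_eq_true, if_false] at hc
        exact h c hc

theorem fcb_zero_iff (r : List Char) (h : ∀ c ∈ r, isBracketB c = true) :
    (fcb r = 0) ↔ (r.all isOpenerB = true) := by
  induction r with
  | nil => simp [fcb]
  | cons c t ih =>
    by_cases hc : isCloserB c = true
    · constructor
      · intro h0
        exfalso
        have : fcb (c :: t) = closerScoreB c := by simp [fcb, hc]
        rw [this] at h0; exact closerScore_ne h0
      · intro hall
        simp only [List.all_cons, Bool.and_eq_true] at hall
        rw [closer_not_opener hc] at hall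
        exact absurd hall.1 (by simp)
    · have hop : isOpenerB c = true := by
        have := h c (by simp)
        simp only [isBracketB, Bool.or_eq_true, hc, Bool.false_eq_true, or_false] at this
        exact this
      simp only [fcb, hc, Bool.false_eq_true, if_false, List.all_cons, hop, Bool.true_and]
      exact ih fun x hx => h x (by simp [hx])

-- the bracket filter is invisible to canon
theorem canon_filter : ∀ (l st : List Char),
    List.foldl canonStep st (l.filter (fun c => isOpenerB c || isCloserB c)) =
      List.foldl canonStep st l := by
  intro l
  induction l with
  | nil => intro st; rfl
  | cons c cs ih =>
    intro st
    by_cases hb : (isOpenerB c || isCloserB c) = true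
    · simp only [List.filter_cons, hb, if_true, List.foldl_cons]
      exact ih _
    · have hno : isOpenerB c = false := by
        simp only [Bool.or_eq_true, not_or, Bool.not_eq_true] at hb; exact hb.1
      have hnc : isCloserB c = false := by
        simp only [Bool.or_eq_true, not_or, Bool.not_eq_true] at hb; exact hb.2
      simp only [List.filter_cons, hb, Bool.false_eq_true, if_false, List.foldl_cons]
      rw [ih]
      congr 1
      simp [canonStep, hno, hnc]

-- per line: B's residue is the reverse of the canonical stack
theorem reduceLine_eq (l : List Char) :
    reduceLine l = (List.foldl canonStep [] l).reverse := by
  unfold reduceLine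
  set cs := l.filter (fun c => isOpenerB c || isCloserB c) with hcs
  obtain ⟨h1, h2, h3⟩ := reduceFuel_spec cs.length cs le_rfl
  have hall : cs.all isBracketB = true := by
    rw [hcs, List.all_eq_true]
    intro c hc
    have := List.of_mem_filter hc
    simpa [isBracketB] using this
  have hbr : ∀ c ∈ reduceFuel cs.length cs, isBracketB c = true := by
    have := h3 isBracketB hall
    exact fun c hc => List.all_eq_true.mp this c hc
  have hfix := noadj_canon (reduceFuel cs.length cs) [] hbr
    (by simpa using rfp_none_noAdj _ h1)
  rw [h2 []] at hfix
  have hr : reduceFuel cs.length cs = (List.foldl canonStep [] cs).reverse := by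
    rw [hfix]; simp
  rw [hr]
  congr 1
  rw [hcs]
  exact canon_filter l []

theorem residue_parse (l : List Char) :
    fcb (reduceLine l) = (parseLine l []).1 ∧
    ((parseLine l []).1 = 0 → (parseLine l []).2 = (reduceLine l).reverse) := by
  have h := parse_canon l [] (by simp)
  rw [reduceLine_eq l]
  refine ⟨h.1, fun h0 => ?_⟩
  rw [← h.2 h0]
  simp

theorem keep_iff' (l : List Char) :
    (parseLine l []).1 = 0 ↔ (reduceLine l).all isOpenerB = true := by
  rw [← (residue_parse l).1]
  refine fcb_zero_iff _ ?_
  rw [reduceLine_eq]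
  intro c hc
  exact canon_all_bracket l [] (by simp) c (by simpa using hc)

-- fold shapes
theorem loop_ok (lines : List String) : ∀ acc : Int × List String,
    (lines.foldl
      (fun (st : Int × List String) i =>
        (st.1 + solveGet i.toList [], if solveGet i.toList [] = 0 then st.2 ++ [i] else st.2))
      acc).2
    = acc.2 ++ lines.filter (fun i => (parseLine i.toList []).1 = 0) := by
  induction lines with
  | nil => intro acc; simp
  | cons l ls ih =>
    intro acc
    simp only [List.foldl_cons]
    rw [ih]
    by_cases h : (parseLine l.toList []).1 = 0
    · simp [get_nil_eq, h]
    · simp [get_nil_eq, h]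

theorem append_fold_eq_map (xs : List String) (f : String → Int) : ∀ acc : List Int,
    xs.foldl (fun ans i => ans ++ [f i]) acc = acc ++ xs.map f := by
  induction xs with
  | nil => intro acc; simp
  | cons x xs ih => intro acc; simp [List.foldl, ih]

theorem b_fold_eq (lines : List String) : ∀ acc : List Int,
    lines.foldl
      (fun scores line =>
        let r := reduceLine line.toList
        if r.all isOpenerB then
          scores ++ [r.reverse.foldl (fun t c => t * 5 + compValB c) 0]
        else scores)
      acc
    = acc ++ (lines.filter (fun i => (reduceLine i.toList).all isOpenerB)).map
        (fun line => (reduceLine line.toList).reverse.foldl (fun t c => t * 5 + compValB c) 0) := by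
  induction lines with
  | nil => intro acc; simp
  | cons l ls ih =>
    intro acc
    simp only [List.foldl_cons]
    rw [ih]
    by_cases h : (reduceLine l.toList).all isOpenerB = true
    · simp [h]
    · simp [h]

theorem filter_bridge (lines : List String) :
    lines.filter (fun i => (parseLine i.toList []).1 = 0)
      = lines.filter (fun i => (reduceLine i.toList).all isOpenerB) := by
  apply List.filter_congr
  intro x _
  by_cases h : (parseLine x.toList []).1 = 0
  · simp [h, (keep_iff' x.toList).mp h]
  · cases hb : (reduceLine x.toList).all isOpenerB
    · simp [h]
    · exact absurd ((keep_iff' x.toList).mpr hb) h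

theorem lists_eq (lines : List String) :
    (lines.filter (fun i => (reduceLine i.toList).all isOpenerB)).map
        (fun i => solveGet2 i.toList [])
    = (lines.filter (fun i => (reduceLine i.toList).all isOpenerB)).map
        (fun line => (reduceLine line.toList).reverse.foldl (fun t c => t * 5 + compValB c) 0) := by
  apply List.map_congr_left
  intro l hl
  have hb : (reduceLine l.toList).all isOpenerB = true := by
    simpa using List.of_mem_filter hl
  have h0 : (parseLine l.toList []).1 = 0 := (keep_iff' l.toList).mpr hb
  rw [get2_nil_eq l.toList h0, (residue_parse l.toList).2 h0]

-- ===== VERDICT (by name: the statement is the Claim_ definition above) =====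
theorem solve_spec : Claim_equal_solve := by
  intro s _ _
  show solve s = solve_alt s
  simp only [solve, solve_alt]
  rw [b_fold_eq, loop_ok, append_fold_eq_map]
  simp only [List.nil_append]
  rw [filter_bridge, lists_eq]
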